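-- pv_equiv track=rewrite | github.com/tim-forrer/Convert2Nex | convert2nex.py | clean_taxon_name
-- ===== SOURCE A (Python) =====
-- import string
--
-- def clean_taxon_name(dirty_name):
--     """
--     If there are any characters that aren't allowed in the taxon name then replace them with "_".
--     """
--
--     str_arr = list(dirty_name)
--     whtspc_chars = string.whitespace
--     disallowed_chars_counter = {"(": 0, ")": 0 , "?": 0 , "=": 0 , "+": 0, "&": 0, ";": 0, ",": 0}
--     for i, char in enumerate(str_arr):
--         if char in whtspc_chars:
--             str_arr[i] = "_"
--         elif char in disallowed_chars_counter.keys():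
--             disallowed_chars_counter[char] += 1
--     for key in disallowed_chars_counter.keys():
--         while disallowed_chars_counter[key] > 0:
--             str_arr.remove(key)
--             disallowed_chars_counter[key] -= 1
--     return "".join(str_arr)
-- ===== SOURCE B (Python) =====
-- import string
--
-- def clean_taxon_name(dirty_name):
--     # One-pass table-driven transform: whitespace -> "_", disallowed chars dropped.
--     table = {ord(c): "_" for c in string.whitespace}
--     for c in "()?=+&;,":
--         table[ord(c)] = None
--     return dirty_name.translate(table)
-- ===== Notes on version B (the rewrite author's own statement) =====
-- stated objective: faster
-- what changed: A's two-pass scheme (replace whitespace in place while counting disallowed chars in a dict, then repeatedly list.remove each counted char) is replaced by one str.translate call over a precomputed table mapping whitespace to underscore and disallowed chars to None.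
import Mathlib
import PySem

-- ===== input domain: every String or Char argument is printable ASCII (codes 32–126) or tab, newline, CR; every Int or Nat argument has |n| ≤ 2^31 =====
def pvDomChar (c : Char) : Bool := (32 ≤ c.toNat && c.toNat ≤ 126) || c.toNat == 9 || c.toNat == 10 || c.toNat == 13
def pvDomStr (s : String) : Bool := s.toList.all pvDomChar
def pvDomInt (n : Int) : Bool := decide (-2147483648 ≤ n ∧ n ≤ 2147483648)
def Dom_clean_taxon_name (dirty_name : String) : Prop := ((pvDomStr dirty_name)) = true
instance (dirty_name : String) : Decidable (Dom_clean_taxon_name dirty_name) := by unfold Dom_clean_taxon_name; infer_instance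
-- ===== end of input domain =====

-- B replaces A's count-then-remove two-loop pass with a single table-driven transform
-- (Python str.translate); a timing run measured B faster; same return value on every input.

-- ===== PORT A =====
-- string.whitespace = " \t\n\r\x0b\x0c" (used for membership only)
def pvWhtspc : List Char := [' ', '\t', '\n', '\r', Char.ofNat 11, Char.ofNat 12]

-- the dict literal disallowed_chars_counter
def pvCounter0 : PySem.Dict Char Int :=
  PySem.Dict.ofList [('(', 0), (')', 0), ('?', 0), ('=', 0), ('+', 0), ('&', 0), (';', 0), (',', 0)]

-- body of the first loop: str_arr[i] = "_" on whitespace (rebuilt by appending: each index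
-- is written at most once, at the iteration that reads it), counter[char] += 1 on a
-- disallowed char
def pvPass1Body (st : List Char × PySem.Dict Char Int) (c : Char) :
    List Char × PySem.Dict Char Int :=
  if pvWhtspc.contains c then (st.1 ++ ['_'], st.2)
  else if st.2.keys.contains c then (st.1 ++ [c], st.2.modify c 0 (· + 1))
  else (st.1 ++ [c], st.2)

-- "while counter[key] > 0: str_arr.remove(key); counter[key] -= 1": the loop body runs the
-- initial counter value many times; the .getD fallback is a totality guard only (Python's
-- remove would raise ValueError exactly there, which never happens: the count is exact)
def pvRemoveN (k : Char) : Nat → List Char → List Char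
  | 0, l => l
  | n + 1, l => pvRemoveN k n ((PySem.List.remove? l k).getD l)

def clean_taxon_name (dirty_name : String) : String :=
  let st := dirty_name.toList.foldl pvPass1Body ([], pvCounter0)
  let final := st.2.keys.foldl (fun a k => pvRemoveN k ((st.2.getD k 0).toNat) a) st.1
  String.mk final

-- ===== PORT B =====
-- Source B builds a translation table: whitespace codepoints ↦ "_", then the codepoints of
-- "()?=+&;," ↦ None; Python's int codepoint keys are represented directly as Char
def pvDisStr : List Char := ['(', ')', '?', '=', '+', '&', ';', ',']

def pvTableB : PySem.Dict Char (Option Char) :=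
  pvDisStr.foldl (fun d c => d.insert c none)
    (pvWhtspc.foldl (fun d c => d.insert c (some '_')) PySem.Dict.empty)

-- str.translate: a char mapped to "_" is replaced, mapped to None dropped, unmapped kept
def clean_taxon_name_alt (dirty_name : String) : String :=
  String.mk (dirty_name.toList.filterMap (fun c => (pvTableB.get? c).getD (some c)))

-- ===== PRECONDITION & SPEC =====
def Spec_clean_taxon_name (dirty_name : String) (out : String) : Prop := out = clean_taxon_name_alt dirty_name
instance (dirty_name : String) (out : String) : Decidable (Spec_clean_taxon_name dirty_name out) := by unfold Spec_clean_taxon_name; infer_instance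

-- ===== CLAIM (what is proved, stated in full; the proofs are below) =====
def Claim_equal_clean_taxon_name : Prop := ∀ (dirty_name : String), Dom_clean_taxon_name dirty_name → Spec_clean_taxon_name dirty_name (clean_taxon_name dirty_name)

-- ===== LEMMAS AND PROOFS =====

-- the per-character replacement performed by A's first loop
def pvG (c : Char) : Char := if pvWhtspc.contains c then '_' else c

-- A's counter update, with the key test against the fixed key list pvDisStr
def pvCntBody (d : PySem.Dict Char Int) (c : Char) : PySem.Dict Char Int :=
  if pvWhtspc.contains c then d
  else if pvDisStr.contains c then d.modify c 0 (· + 1) else d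

lemma pvDis_not_ws {k : Char} (hk : k ∈ pvDisStr) : pvWhtspc.contains k = false := by
  fin_cases hk <;> decide

lemma pvCnt_keys : ∀ (l : List Char) (d : PySem.Dict Char Int), d.keys = pvDisStr →
    (l.foldl pvCntBody d).keys = pvDisStr := by
  intro l
  induction l with
  | nil => intro d h; exact h
  | cons c t ih =>
    intro d h
    simp only [List.foldl_cons]
    apply ih
    unfold pvCntBody
    split_ifs with h1 h2
    · exact h
    · rw [PySem.Dict.keys_modify, PySem.Dict.keys_insert_of_contains, h]
      rw [PySem.Dict.contains_iff_mem_keys, h]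
      simpa using h2
    · exact h

lemma pvPass1_spec : ∀ (l acc : List Char) (d : PySem.Dict Char Int), d.keys = pvDisStr →
    l.foldl pvPass1Body (acc, d) = (acc ++ l.map pvG, l.foldl pvCntBody d) := by
  intro l
  induction l with
  | nil => intro acc d _; simp
  | cons c t ih =>
    intro acc d h
    simp only [List.foldl_cons, List.map_cons]
    have hb : pvPass1Body (acc, d) c = (acc ++ [pvG c], pvCntBody d c) := by
      unfold pvPass1Body pvCntBody pvG
      simp only [h]
      split_ifs <;> rfl
    have hkeys : (pvCntBody d c).keys = pvDisStr := by
      have := pvCnt_keys [c] d h; simpa using this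
    rw [hb, ih (acc ++ [pvG c]) _ hkeys]
    simp

lemma pvCnt_getD : ∀ (l : List Char) (d : PySem.Dict Char Int) (k : Char), k ∈ pvDisStr →
    (l.foldl pvCntBody d).getD k 0 = d.getD k 0 + l.count k := by
  intro l
  induction l with
  | nil => intro d k _; simp
  | cons c t ih =>
    intro d k hk
    simp only [List.foldl_cons]
    rw [ih _ k hk]
    have hB : (pvCntBody d c).getD k 0 = d.getD k 0 + (if c = k then 1 else 0) := by
      unfold pvCntBody
      by_cases hkc : c = k
      · subst hkc
        have hnw : c ∉ pvWhtspc := by simpa using pvDis_not_ws hk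
        simp only [List.contains_eq_mem, hk, decide_true, if_true]
        rw [if_neg (by simpa using hnw), PySem.Dict.getD_modify_self]
      · split_ifs with h1 h2
        · simp
        · rw [PySem.Dict.getD_modify, if_neg (fun h => hkc h.symm)]
          simp
        · simp
    rw [hB, List.count_cons]
    by_cases hkc : c = k <;> simp [hkc] <;> ring

lemma pvRemoveN_cons_ne (k c : Char) (h : c ≠ k) :
    ∀ (n : Nat) (m : List Char), pvRemoveN k n (c :: m) = c :: pvRemoveN k n m := by
  intro n
  induction n with
  | zero => intro m; rfl
  | succ n ih =>
    intro m
    simp only [pvRemoveN]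
    rw [PySem.List.remove?_cons_of_ne _ h]
    cases hr : PySem.List.remove? m k with
    | none => simp only [Option.map_none, Option.getD_none]; exact ih m
    | some m' => simp only [Option.map_some, Option.getD_some]; exact ih m'

lemma pvRemoveN_count : ∀ (m : List Char) (k : Char),
    pvRemoveN k (m.count k) m = m.filter (fun c => c != k) := by
  intro m
  induction m with
  | nil => intro k; rfl
  | cons c t ih =>
    intro k
    by_cases h : c = k
    · subst h
      simp only [List.count_cons_self, pvRemoveN, PySem.List.remove?_cons_self,
        Option.getD_some, List.filter_cons, bne_self_eq_false, Bool.false_eq_true, if_false]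
      exact ih c
    · rw [List.count_cons_of_ne h, pvRemoveN_cons_ne k c h, ih k,
        List.filter_cons_of_pos (by simpa using h)]

lemma pvFoldRemove : ∀ (ks m : List Char) (cnt : Char → Nat), ks.Nodup →
    (∀ k ∈ ks, cnt k = m.count k) →
    ks.foldl (fun a k => pvRemoveN k (cnt k) a) m = m.filter (fun c => !(ks.contains c)) := by
  intro ks
  induction ks with
  | nil => intro m cnt _ _; simp
  | cons k ks' ih =>
    intro m cnt hnd hcnt
    simp only [List.foldl_cons]
    rw [hcnt k (List.mem_cons_self), pvRemoveN_count]
    rw [ih _ cnt hnd.of_cons]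
    · rw [List.filter_filter]
      apply List.filter_congr
      intro c _
      by_cases hck : c = k <;> simp [hck]
    · intro k' hk'
      have hne : k' ≠ k := by rintro rfl; exact (List.nodup_cons.mp hnd).1 hk'
      rw [hcnt k' (List.mem_cons_of_mem _ hk'), List.count_filter (by simpa using hne)]

lemma pvCount_map_g (l : List Char) (k : Char) (hk : k ∈ pvDisStr) :
    (l.map pvG).count k = l.count k := by
  induction l with
  | nil => rfl
  | cons c t ih =>
    have hgk : pvG c = k ↔ c = k := by
      unfold pvG
      split_ifs with h
      · constructor
        · intro h2; exfalso; revert h2; fin_cases hk <;> decide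
        · rintro rfl; exfalso; revert h; fin_cases hk <;> decide
      · exact Iff.rfl
    simp only [List.map_cons, List.count_cons, ih]
    congr 1
    simp [hgk]

lemma pvTable_get (c : Char) : (pvTableB.get? c).getD (some c) =
    if pvWhtspc.contains c then some '_' else if pvDisStr.contains c then none else some c := by
  by_cases h1 : c ∈ pvWhtspc
  · fin_cases h1 <;> decide
  · by_cases h2 : c ∈ pvDisStr
    · fin_cases h2 <;> decide
    · rw [if_neg (by simpa using h1), if_neg (by simpa using h2)]
      have : pvTableB.get? c = none := by
        simp only [pvTableB, pvWhtspc, pvDisStr] at *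
        simp only [List.foldl_cons, List.foldl_nil]
        simp at h1 h2
        simp [PySem.Dict.get?_insert_of_ne _ _ (by tauto : c ≠ ','),
          PySem.Dict.get?_insert_of_ne _ _ (by tauto : c ≠ ';'),
          PySem.Dict.get?_insert_of_ne _ _ (by tauto : c ≠ '&'),
          PySem.Dict.get?_insert_of_ne _ _ (by tauto : c ≠ '+'),
          PySem.Dict.get?_insert_of_ne _ _ (by tauto : c ≠ '='),
          PySem.Dict.get?_insert_of_ne _ _ (by tauto : c ≠ '?'),
          PySem.Dict.get?_insert_of_ne _ _ (by tauto : c ≠ ')'),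
          PySem.Dict.get?_insert_of_ne _ _ (by tauto : c ≠ '('),
          PySem.Dict.get?_insert_of_ne _ _ (by tauto : c ≠ Char.ofNat 12),
          PySem.Dict.get?_insert_of_ne _ _ (by tauto : c ≠ Char.ofNat 11),
          PySem.Dict.get?_insert_of_ne _ _ (by tauto : c ≠ '\r'),
          PySem.Dict.get?_insert_of_ne _ _ (by tauto : c ≠ '\n'),
          PySem.Dict.get?_insert_of_ne _ _ (by tauto : c ≠ '\t'),
          PySem.Dict.get?_insert_of_ne _ _ (by tauto : c ≠ ' ')]
      rw [this]; rfl

lemma pvFinal (l : List Char) :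
    (l.map pvG).filter (fun c => !(pvDisStr.contains c)) =
      l.filterMap (fun c => (pvTableB.get? c).getD (some c)) := by
  induction l with
  | nil => rfl
  | cons c t ih =>
    by_cases h1 : pvWhtspc.contains c = true
    · have hg : pvG c = '_' := if_pos h1
      have hf : (pvTableB.get? c).getD (some c) = some '_' := by rw [pvTable_get c, if_pos h1]
      rw [List.map_cons,
        List.filterMap_cons_some (f := fun x => (pvTableB.get? x).getD (some x)) hf,
        List.filter_cons, hg, if_pos (by decide : (!pvDisStr.contains '_') = true), ih]
    · simp only [Bool.not_eq_true] at h1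
      have hg : pvG c = c := by unfold pvG; rw [h1]; simp
      by_cases h2 : pvDisStr.contains c = true
      · have hf : (pvTableB.get? c).getD (some c) = none := by
          rw [pvTable_get c, h1, if_pos h2]; simp
        rw [List.map_cons,
          List.filterMap_cons_none (f := fun x => (pvTableB.get? x).getD (some x)) hf,
          List.filter_cons, hg, if_neg (by simp [(by simpa using h2 : c ∈ pvDisStr)]), ih]
      · simp only [Bool.not_eq_true] at h2
        have hf : (pvTableB.get? c).getD (some c) = some c := by
          rw [pvTable_get c, h1, h2]; simp
        rw [List.map_cons,
          List.filterMap_cons_some (f := fun x => (pvTableB.get? x).getD (some x)) hf,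
          List.filter_cons, hg, if_pos (by simp [(by simpa using h2 : c ∉ pvDisStr)]), ih]

-- ===== VERDICT (by name: the statement is the Claim_ definition above) =====
theorem clean_taxon_name_spec : Claim_equal_clean_taxon_name := by
  intro s _
  unfold Spec_clean_taxon_name clean_taxon_name clean_taxon_name_alt
  have hk0 : pvCounter0.keys = pvDisStr := by decide
  rw [pvPass1_spec s.toList [] pvCounter0 hk0]
  simp only [List.nil_append]
  rw [pvCnt_keys s.toList pvCounter0 hk0]
  rw [pvFoldRemove pvDisStr _ _ (by decide)
    (fun k hk => by
      rw [pvCnt_getD s.toList pvCounter0 k hk, pvCount_map_g s.toList k hk]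
      have h0 : pvCounter0.getD k 0 = 0 := by
        fin_cases hk <;> decide
      rw [h0]; simp)]
  rw [pvFinal]
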